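-- pv_equiv track=rewrite | github.com/JunSeokCheon/Solve-problem-step-by-step-with-baekjoon | 프로그래머스/lv1_문자열 나누기.py | solution
-- ===== SOURCE A (Python) =====
-- def solution(s):
--     answer = 0
--     max_len = len(s)
--
--     stand_num = s[0]
--     stand_cnt = 1
--     diff_cnt = 0
--     idx = 0
--
--     while True:
--         if len(s) == 1:
--             answer += 1
--             break
--         idx += 1
--         if s[idx] == stand_num:
--             stand_cnt += 1
--         else:
--             diff_cnt += 1
--
--         if stand_cnt == diff_cnt and len(s) == idx+1:
--             answer += 1
--             break
--         elif stand_cnt == diff_cnt: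
--             answer += 1
--             s = s[idx+1:]
--             stand_num = s[0]
--             stand_cnt = 1
--             diff_cnt = 0
--             idx = 0
--         elif len(s) == idx + 1:
--             answer += 1
--             break
--
--     return answer
-- ===== SOURCE B (Python) =====
-- def solution(s):
--     answer = 0
--     stand = None
--     same = 0
--     diff = 0
--     for c in s:
--         if same == diff:
--             answer += 1
--             stand = c
--             same, diff = 1, 0
--         elif c == stand:
--             same += 1
--         else:
--             diff += 1
--     return answer
-- ===== Notes on version B (the rewrite author's own statement) =====
-- stated objective: faster
-- what changed: B replaces A's restart-with-substring-slicing loop by a single left-to-right pass that counts a new segment when the two counters tie, carrying (answer, stand, same, diff) and never slicing.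
import Mathlib
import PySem

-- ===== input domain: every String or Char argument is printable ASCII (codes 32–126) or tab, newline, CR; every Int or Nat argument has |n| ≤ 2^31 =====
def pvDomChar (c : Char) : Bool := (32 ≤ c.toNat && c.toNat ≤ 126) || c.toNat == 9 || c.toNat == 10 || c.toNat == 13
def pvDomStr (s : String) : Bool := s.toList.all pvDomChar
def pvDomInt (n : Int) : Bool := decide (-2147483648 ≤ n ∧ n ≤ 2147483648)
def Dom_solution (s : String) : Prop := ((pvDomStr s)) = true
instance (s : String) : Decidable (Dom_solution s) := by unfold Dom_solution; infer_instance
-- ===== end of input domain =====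

-- B: one O(n) pass carrying (answer, stand, same, diff) instead of A's O(n^2) restart-with-slicing loop; return values proved equal on nonempty strings (A raises IndexError on "").

-- ===== PORT A =====
-- A's while-loop, reading one segment at a time: solA_go restarts on a fresh slice
-- (A's 'if len(s) == 1' check and 's = s[idx+1:]' reset), solA_loop is one pass of
-- the loop body over the current segment with counters stand_cnt/diff_cnt.
mutual
def solA_go (s : List Char) (answer : Int) : Int :=
  match s with
  | [] => answer            -- unreachable: A's reset always leaves a nonempty slice
  | [_] => answer + 1       -- 'if len(s) == 1: answer += 1; break'
  | c :: rest => solA_loop c 1 0 rest answer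
termination_by s.length

def solA_loop (stand : Char) (sc dc : Int) (rest : List Char) (answer : Int) : Int :=
  match rest with
  | [] => answer + 1        -- unreachable in A (s[idx] would be IndexError); arbitrary
  | c :: rest' =>
    let sc' := if c = stand then sc + 1 else sc
    let dc' := if c = stand then dc else dc + 1
    if sc' = dc' ∧ rest' = [] then answer + 1
    else if sc' = dc' then solA_go rest' (answer + 1)
    else if rest' = [] then answer + 1
    else solA_loop stand sc' dc' rest' answer
termination_by rest.length
end

def solution (s : String) : Int :=
  match s.toList with
  | [] => 0                 -- A raises IndexError here (s[0]); excluded by Pre_solution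
  | l => solA_go l 0

-- ===== PORT B =====
def stepB (st : Int × Option Char × Int × Int) (c : Char) : Int × Option Char × Int × Int :=
  match st with
  | (ans, stand, same, diff) =>
    if same = diff then (ans + 1, some c, 1, 0)
    else if some c = stand then (ans, stand, same + 1, diff)
    else (ans, stand, same, diff + 1)

def solution_alt (s : String) : Int :=
  (s.toList.foldl stepB (0, none, 0, 0)).1

-- ===== PRECONDITION & SPEC =====
-- A reads s[0] unconditionally, so it raises IndexError on the empty string; Pre_ excludes exactly that.
def Pre_solution (s : String) : Prop := s ≠ ""
instance (s : String) : Decidable (Pre_solution s) := by unfold Pre_solution; infer_instance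
def pvWitness_solution : String := ("aabb")

def Spec_solution (s : String) (out : Int) : Prop := out = solution_alt s
instance (s : String) (out : Int) : Decidable (Spec_solution s out) := by unfold Spec_solution; infer_instance

-- ===== CLAIM (what is proved, stated in full; the proofs are below) =====
def Claim_equal_solution : Prop := ∀ (s : String), Dom_solution s → Pre_solution s → Spec_solution s (solution s)
-- ===== LEMMAS AND PROOFS =====

-- Key invariant: during a segment, B's running answer is one ahead of A's (B counts a
-- segment when it opens, A when it closes), and the counters coincide.
theorem loop_eq : ∀ (n : Nat) (rest : List Char), rest.length ≤ n →
    ∀ (stand : Char) (sc dc a : Int), sc ≠ dc →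
    (List.foldl stepB (a + 1, some stand, sc, dc) rest).1 = solA_loop stand sc dc rest a := by
  intro n
  induction n with
  | zero =>
    intro rest h
    interval_cases h' : rest.length
    · simp at h'; subst h'; intro stand sc dc a _; simp [solA_loop]
  | succ n ih =>
    intro rest hlen stand sc dc a hne
    match rest with
    | [] => simp [solA_loop]
    | c :: rest' =>
      have hstep : stepB (a + 1, some stand, sc, dc) c =
          (a + 1, some stand, (if c = stand then sc + 1 else sc), (if c = stand then dc else dc + 1)) := by
        simp [stepB, hne]
        by_cases hc : c = stand <;> simp [hc]
      set sc' := (if c = stand then sc + 1 else sc) with hsc'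
      set dc' := (if c = stand then dc else dc + 1) with hdc'
      simp only [List.foldl_cons, hstep]
      by_cases heq : sc' = dc'
      · -- segment closes after this char
        match rest' with
        | [] => simp [solA_loop, ← hsc', ← hdc', heq]
        | c' :: rest'' =>
          have h2 : stepB (a + 1, some stand, sc', dc') c' = (a + 1 + 1, some c', 1, 0) := by
            simp [stepB, heq]
          simp only [List.foldl_cons, h2]
          simp only [solA_loop, ← hsc', ← hdc', heq]
          simp only [List.cons_ne_nil, and_false, reduceIte]
          match rest'' with
          | [] => simp [solA_go]
          | c'' :: r =>
            simp only [solA_go]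
            have : (c'' :: r).length ≤ n := by
              simp [List.length_cons] at hlen ⊢; omega
            exact ih (c'' :: r) this c' 1 0 (a + 1) (by decide)
      · -- segment continues
        match rest' with
        | [] => simp [solA_loop, ← hsc', ← hdc', heq]
        | c' :: rest'' =>
          have hr : (c' :: rest'').length ≤ n := by
            simp [List.length_cons] at hlen ⊢; omega
          have := ih (c' :: rest'') hr stand sc' dc' a heq
          conv_rhs => rw [solA_loop]
          simp only [← hsc', ← hdc', List.cons_ne_nil, and_false, reduceIte, if_neg heq]
          exact this

theorem solution_eq (s : String) (h : s ≠ "") : solution s = solution_alt s := by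
  have hl : s.toList ≠ [] := by
    simp_all [String.toList_eq_nil_iff]
  unfold solution solution_alt
  match hm : s.toList with
  | [] => exact absurd hm hl
  | [c] => simp [solA_go, stepB]
  | c :: c' :: rest =>
    have h1 : List.foldl stepB (0, none, 0, 0) (c :: c' :: rest) =
        List.foldl stepB ((0 : Int) + 1, some c, 1, 0) (c' :: rest) := by
      simp [List.foldl_cons, stepB]
    simp only [solA_go, h1]
    exact (loop_eq (c' :: rest).length (c' :: rest) le_rfl c 1 0 0 (by decide)).symm

-- ===== VERDICT (by name: the statement is the Claim_ definition above) =====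
theorem solution_spec : Claim_equal_solution := by
  intro s _ hpre
  unfold Spec_solution
  exact solution_eq s hpre
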